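-- pv_equiv track=rewrite | github.com/chris-data-pro/python-algorithm | algorithm/dp_2_strings.py | min_distict_letters_combine_2_strings_bf
-- ===== SOURCE A (Python) =====
-- def min_distict_letters_combine_2_strings_bf(P, Q):
--     # Implement your solution here
--     from functools import lru_cache
--
--     @lru_cache(None)
--     def dp(i, used_letters):
--         # Base case: if we have processed all characters
--         if i == len(P):
--             return len(used_letters)
--
--         while P[i] == Q[i] and i <= len(P) - 2:
--             used_letters += (P[i],)  # to add tuples
--             i += 1
--
--         # Convert used_letters set to tuple for hashing
--         used_letters_set = set(used_letters)
--
--         # Case 1: Choose P[i]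
--         used_letters_p = used_letters_set | {P[i]}  # to add P[i] to set, if it's already in set, do nothing
--         result_p = dp(i + 1, tuple(used_letters_p))
--
--         # Case 2: Choose Q[i]
--         used_letters_q = used_letters_set | {Q[i]}
--         result_q = dp(i + 1, tuple(used_letters_q))
--
--         # Return the minimum of the two choices
--         return min(result_p, result_q)
--
--     # Start the recursion from the first position with an empty set of used letters
--     return dp(0, tuple())
-- ===== SOURCE B (Python) =====
-- def min_distict_letters_combine_2_strings_bf(P, Q):
--     # Reduce to exact minimum vertex cover on the letter graph:
--     # position i forces using P[i] or Q[i]; build the distinct edge set once,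
--     # then solve min vertex cover by branch-and-memoize on the edge set.
--     from functools import lru_cache
--
--     edges = set()
--     for i in range(len(P)):
--         a, b = P[i], Q[i]
--         edges.add((a, b) if a <= b else (b, a))
--
--     @lru_cache(None)
--     def cover(es):
--         if not es:
--             return 0
--         a, b = min(es)
--         rest_a = frozenset(e for e in es if e[0] != a and e[1] != a)
--         if a == b:
--             return 1 + cover(rest_a)
--         rest_b = frozenset(e for e in es if e[0] != b and e[1] != b)
--         return 1 + min(cover(rest_a), cover(rest_b))
--
--     return cover(frozenset(edges))
-- ===== Notes on version B (the rewrite author's own statement) =====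
-- stated objective: faster
-- what changed: Instead of A's exponential per-position recursion over (index, used-letter-set) states, B reduces the problem to exact minimum vertex cover on the graph whose vertices are letters and whose distinct edges are the pairs {P[i],Q[i]}, built in one pass, then solved by memoized branch-on-an-edge over the edge set.
import Mathlib
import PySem

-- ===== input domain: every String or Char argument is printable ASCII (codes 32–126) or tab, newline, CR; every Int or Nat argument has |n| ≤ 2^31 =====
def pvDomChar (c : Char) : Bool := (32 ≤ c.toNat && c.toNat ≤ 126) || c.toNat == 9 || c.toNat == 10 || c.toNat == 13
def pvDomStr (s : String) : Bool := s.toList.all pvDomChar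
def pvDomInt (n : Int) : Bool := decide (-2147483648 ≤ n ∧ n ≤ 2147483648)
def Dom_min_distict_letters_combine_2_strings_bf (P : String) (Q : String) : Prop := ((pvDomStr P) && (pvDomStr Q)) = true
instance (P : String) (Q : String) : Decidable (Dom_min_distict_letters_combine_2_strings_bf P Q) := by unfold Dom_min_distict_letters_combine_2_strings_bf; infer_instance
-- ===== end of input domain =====

-- B replaces A's exponential recursion over (position, used-letter-set) states by an exact
-- minimum-vertex-cover computation on the distinct letter pairs, built in one pass (objective: faster).

-- ===== PORT A =====
-- the inner 'while P[i] == Q[i] and i <= len(P) - 2' loop of dp (indices are in range under Pre_,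
-- so reads are ported as getD with an arbitrary default)
def pvSkipA (p q : List Char) (n : Nat) (i : Nat) (used : List Char) : Nat × List Char :=
  if _h : (p.getD i ' ' = q.getD i ' ') ∧ i + 2 ≤ n then
    pvSkipA p q n (i + 1) (used ++ [p.getD i ' '])
  else (i, used)
termination_by n - i
decreasing_by omega

-- cited by dpA's decreasing_by: the while loop only moves i forward
theorem pvSkipA_ge (p q : List Char) (n i : Nat) (used : List Char) :
    i ≤ (pvSkipA p q n i used).1 := by
  rw [pvSkipA]
  split
  · exact le_trans (Nat.le_succ i) (pvSkipA_ge p q n (i + 1) _)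
  · exact le_refl i
termination_by n - i
decreasing_by omega

-- cited by pvDpA's decreasing_by: the while loop stays below n
theorem pvSkipA_lt (p q : List Char) (n i : Nat) (used : List Char) (h : i < n) :
    (pvSkipA p q n i used).1 < n := by
  rw [pvSkipA]
  split
  · exact pvSkipA_lt p q n (i + 1) _ (by omega)
  · exact h
termination_by n - i
decreasing_by omega

-- A's dp(i, used_letters) (the lru_cache only affects speed, not the value)
def pvDpA (p q : List Char) (n : Nat) (i : Nat) (used : List Char) : Int :=
  if i = n then (used.length : Int)
  else if h : i < n then
    let r := pvSkipA p q n i used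
    let s : PySem.Set Char := PySem.Set.ofList r.2        -- set(used_letters)
    let rp := pvDpA p q n (r.1 + 1) (PySem.Set.add s (p.getD r.1 ' '))
    let rq := pvDpA p q n (r.1 + 1) (PySem.Set.add s (q.getD r.1 ' '))
    min rp rq
  else 0  -- unreachable totality guard: dp is only ever invoked with i ≤ n
termination_by n - i
decreasing_by
  · have h1 := pvSkipA_ge p q n i used; have h2 := pvSkipA_lt p q n i used h; omega
  · have h1 := pvSkipA_ge p q n i used; have h2 := pvSkipA_lt p q n i used h; omega

def min_distict_letters_combine_2_strings_bf (P : String) (Q : String) : Int :=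
  pvDpA P.toList Q.toList P.toList.length 0 []

-- ===== PORT B =====
-- normalized (unordered) letter pair, as in Source B: '(a, b) if a <= b else (b, a)'
def pvNorm (a b : Char) : Char × Char := if a ≤ b then (a, b) else (b, a)

-- the edge-building pass: 'for i in range(len(P)): edges.add(...)'
def pvEdges (p q : List Char) : PySem.Set (Char × Char) :=
  (List.range p.length).foldl
    (fun s i => PySem.Set.add s (pvNorm (p.getD i ' ') (q.getD i ' '))) PySem.Set.empty

-- 'min(es)' on a set of distinct pairs: the lexicographic minimum (hand-ported fold; exact since
-- the minimum of a Python set of distinct tuples does not depend on iteration order)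
def pvLexLe (x y : Char × Char) : Bool := x.1 < y.1 || (x.1 = y.1 && x.2 ≤ y.2)
def pvMinEdge (e : Char × Char) (l : List (Char × Char)) : Char × Char :=
  l.foldl (fun m f => if pvLexLe f m then f else m) e

-- cited by pvCover's decreasing_by
theorem pvMinEdge_mem (e : Char × Char) (l : List (Char × Char)) :
    pvMinEdge e l ∈ e :: l := by
  induction l generalizing e with
  | nil => simp [pvMinEdge]
  | cons f t ih =>
    simp only [pvMinEdge, List.foldl_cons]
    by_cases hc : pvLexLe f e = true
    · rw [if_pos hc]
      have h := ih f
      simp only [pvMinEdge] at h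
      rcases List.mem_cons.1 h with h1 | h1 <;> simp [h1]
    · rw [if_neg hc]
      have h := ih e
      simp only [pvMinEdge] at h
      rcases List.mem_cons.1 h with h1 | h1 <;> simp [h1]

-- '(e for e in es if e[0] != v and e[1] != v)'
def pvDropTouch (v : Char) (es : List (Char × Char)) : List (Char × Char) :=
  es.filter (fun f => decide (f.1 ≠ v ∧ f.2 ≠ v))

theorem pvDropTouch_lt (v : Char) (es : List (Char × Char)) (e : Char × Char)
    (he : e ∈ es) (hv : e.1 = v ∨ e.2 = v) : (pvDropTouch v es).length < es.length := by
  apply List.length_filter_lt_length_iff_exists.2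
  refine ⟨e, he, ?_⟩
  simp only [decide_eq_true_eq, not_and, not_not]
  tauto

-- Source B's cover(es) (memoization affects speed only)
def pvCover : List (Char × Char) → Int
  | [] => 0
  | e :: t =>
    let m := pvMinEdge e t
    let ra := pvDropTouch m.1 (e :: t)
    if m.1 = m.2 then 1 + pvCover ra
    else 1 + min (pvCover ra) (pvCover (pvDropTouch m.2 (e :: t)))
termination_by es => es.length
decreasing_by
  · exact pvDropTouch_lt _ _ _ (pvMinEdge_mem e t) (Or.inl rfl)
  · exact pvDropTouch_lt _ _ _ (pvMinEdge_mem e t) (Or.inl rfl)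
  · exact pvDropTouch_lt _ _ _ (pvMinEdge_mem e t) (Or.inr rfl)

def min_distict_letters_combine_2_strings_bf_alt (P : String) (Q : String) : Int :=
  pvCover (pvEdges P.toList Q.toList)

-- ===== PRECONDITION & SPEC =====
-- A indexes Q[i] for every i < len(P), so it raises IndexError exactly when len(Q) < len(P) (with
-- len(P) > 0); Pre_ admits every input on which A returns. (The ports are total via default reads,
-- so the proof of the claim happens to hold without consuming Pre_.)
def Pre_min_distict_letters_combine_2_strings_bf (P : String) (Q : String) : Prop :=
  P.toList.length ≤ Q.toList.length
instance (P : String) (Q : String) : Decidable (Pre_min_distict_letters_combine_2_strings_bf P Q) := by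
  unfold Pre_min_distict_letters_combine_2_strings_bf; infer_instance

def pvWitness_min_distict_letters_combine_2_strings_bf : String × String := ("abab", "bcca")

def Spec_min_distict_letters_combine_2_strings_bf (P : String) (Q : String) (out : Int) : Prop := out = min_distict_letters_combine_2_strings_bf_alt P Q
instance (P : String) (Q : String) (out : Int) : Decidable (Spec_min_distict_letters_combine_2_strings_bf P Q out) := by unfold Spec_min_distict_letters_combine_2_strings_bf; infer_instance

-- ===== CLAIM (what is proved, stated in full; the proofs are below) =====
def Claim_equal_min_distict_letters_combine_2_strings_bf : Prop := ∀ (P : String) (Q : String), Dom_min_distict_letters_combine_2_strings_bf P Q → Pre_min_distict_letters_combine_2_strings_bf P Q → Spec_min_distict_letters_combine_2_strings_bf P Q (min_distict_letters_combine_2_strings_bf P Q)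

-- ===== LEMMAS AND PROOFS =====

-- the position pairs (P[i], Q[i])
def pvPairs (p q : List Char) : List (Char × Char) :=
  (List.range p.length).map (fun i => (p.getD i ' ', q.getD i ' '))

-- minimum over all per-position choices (the mathematical content of A's dp)
def pvMC : List (Char × Char) → Finset Char → Nat
  | [], U => U.card
  | e :: L, U => min (pvMC L (insert e.1 U)) (pvMC L (insert e.2 U))

-- vertex covers of an edge list, and the minimum cover size
def pvHits (S : Finset Char) (E : List (Char × Char)) : Prop := ∀ e ∈ E, e.1 ∈ S ∨ e.2 ∈ S
def pvVCSet (E : List (Char × Char)) : Set Nat := {k | ∃ S : Finset Char, pvHits S E ∧ S.card = k}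
noncomputable def pvVC (E : List (Char × Char)) : Nat := sInf (pvVCSet E)

theorem pvVCSet_nonempty (E : List (Char × Char)) : (pvVCSet E).Nonempty := by
  exact ⟨_, (E.map Prod.fst).toFinset, fun e he => Or.inl (by simp; exact ⟨e.2, he⟩), rfl⟩


-- ---- small bridges ----

theorem pvInsert_union_of_mem {v : Char} {U S : Finset Char} (h : v ∈ S) :
    insert v U ∪ S = U ∪ S := by
  ext x
  simp only [Finset.mem_union, Finset.mem_insert]
  constructor
  · rintro ((rfl | hx) | hx)
    · exact Or.inr h
    · exact Or.inl hx
    · exact Or.inr hx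
  · rintro (hx | hx)
    · exact Or.inl (Or.inr hx)
    · exact Or.inr hx

theorem pvToFinset_add (s : PySem.Set Char) (c : Char) :
    (PySem.Set.add s c).toFinset = insert c s.toFinset := by
  ext x; simp [PySem.Set.mem_add]; tauto

theorem pvToFinset_ofList (l : List Char) :
    (PySem.Set.ofList l).toFinset = l.toFinset := by
  ext x; simp [PySem.Set.mem_ofList]

theorem pvPairs_length (p q : List Char) : (pvPairs p q).length = p.length := by
  simp [pvPairs]

theorem pvPairs_drop (p q : List Char) (i : Nat) (h : i < p.length) :
    (pvPairs p q).drop i = (p.getD i ' ', q.getD i ' ') :: (pvPairs p q).drop (i + 1) := by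
  rw [List.drop_eq_getElem_cons (by simpa [pvPairs_length] using h)]
  simp [pvPairs]

-- ---- A's dp computes the per-position-choice minimum ----

theorem pvDpA_eq (p q : List Char) (i : Nat) (used : List Char)
    (hle : i ≤ p.length) (hnd : i = p.length → used.Nodup) :
    pvDpA p q p.length i used = ((pvMC ((pvPairs p q).drop i) used.toFinset : Nat) : Int) := by
  rw [pvDpA]
  by_cases hb : i = p.length
  · rw [if_pos hb]
    rw [List.drop_of_length_le (by rw [pvPairs_length]; omega)]
    simp [pvMC, List.toFinset_card_of_nodup (hnd hb)]
  · rw [if_neg hb, dif_pos (by omega)]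
    by_cases hs : (p.getD i ' ' = q.getD i ' ') ∧ i + 2 ≤ p.length
    · -- forced position: dp(i, used) computes the same thing as dp(i+1, used ++ [P[i]])
      have hskip : pvSkipA p q p.length i used
          = pvSkipA p q p.length (i + 1) (used ++ [p.getD i ' ']) := by
        rw [pvSkipA]; rw [dif_pos hs]
      have hun : pvDpA p q p.length (i + 1) (used ++ [p.getD i ' '])
          = min (pvDpA p q p.length ((pvSkipA p q p.length (i+1) (used ++ [p.getD i ' '])).1 + 1)
                  (PySem.Set.add (PySem.Set.ofList (pvSkipA p q p.length (i+1) (used ++ [p.getD i ' '])).2)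
                    (p.getD (pvSkipA p q p.length (i+1) (used ++ [p.getD i ' '])).1 ' ')))
                (pvDpA p q p.length ((pvSkipA p q p.length (i+1) (used ++ [p.getD i ' '])).1 + 1)
                  (PySem.Set.add (PySem.Set.ofList (pvSkipA p q p.length (i+1) (used ++ [p.getD i ' '])).2)
                    (q.getD (pvSkipA p q p.length (i+1) (used ++ [p.getD i ' '])).1 ' '))) := by
        rw [pvDpA]; rw [if_neg (by omega), dif_pos (by omega)]
      rw [hskip, ← hun]
      rw [pvDpA_eq p q (i + 1) (used ++ [p.getD i ' ']) (by omega) (by intro h; omega)]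
      have hts : (used ++ [p.getD i ' ']).toFinset = insert (p.getD i ' ') used.toFinset := by
        ext x; simp
      rw [pvPairs_drop p q i (by omega), ← hs.1, hts]
      simp [pvMC]
    · -- branching position
      have hskip : pvSkipA p q p.length i used = (i, used) := by
        rw [pvSkipA]; rw [dif_neg hs]
      rw [hskip]
      dsimp only
      have hnda : ∀ c : Char, (PySem.Set.add (PySem.Set.ofList used) c).Nodup :=
        fun c => PySem.Set.nodup_add _ _ (PySem.Set.nodup_ofList used)
      rw [pvDpA_eq p q (i + 1) _ (by omega) (fun _ => hnda _),
          pvDpA_eq p q (i + 1) _ (by omega) (fun _ => hnda _)]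
      rw [pvPairs_drop p q i (by omega)]
      rw [pvToFinset_add, pvToFinset_add, pvToFinset_ofList]
      simp [pvMC, Nat.cast_min]
termination_by p.length - i
decreasing_by
  all_goals omega

-- ---- the choice minimum is the minimum vertex cover ----

theorem pvMC_le (L : List (Char × Char)) :
    ∀ (U : Finset Char) (S : Finset Char), pvHits S L → pvMC L U ≤ (U ∪ S).card := by
  induction L with
  | nil =>
    intro U S _
    exact Finset.card_le_card Finset.subset_union_left
  | cons e L ih =>
    intro U S hS
    rcases hS e (by simp) with h | h
    · refine le_trans (min_le_left _ _) ?_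
      refine le_trans (ih (insert e.1 U) S (fun f hf => hS f (by simp [hf]))) ?_
      rw [pvInsert_union_of_mem h]
    · refine le_trans (min_le_right _ _) ?_
      refine le_trans (ih (insert e.2 U) S (fun f hf => hS f (by simp [hf]))) ?_
      rw [pvInsert_union_of_mem h]

theorem pvMC_achieved (L : List (Char × Char)) :
    ∀ (U : Finset Char), ∃ S : Finset Char, pvHits S L ∧ (U ∪ S).card ≤ pvMC L U := by
  induction L with
  | nil =>
    intro U
    exact ⟨∅, fun f hf => absurd hf (by simp), by simp [pvMC]⟩
  | cons e L ih =>
    intro U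
    rcases le_total (pvMC L (insert e.1 U)) (pvMC L (insert e.2 U)) with h | h
    · obtain ⟨S, hS, hc⟩ := ih (insert e.1 U)
      refine ⟨insert e.1 S, ?_, ?_⟩
      · intro f hf
        rcases List.mem_cons.1 hf with rfl | hf
        · exact Or.inl (Finset.mem_insert_self _ _)
        · rcases hS f hf with h' | h'
          · exact Or.inl (Finset.mem_insert_of_mem h')
          · exact Or.inr (Finset.mem_insert_of_mem h')
      · have heq : U ∪ insert e.1 S = insert e.1 U ∪ S := by ext x; simp
        rw [heq]
        calc (insert e.1 U ∪ S).card ≤ pvMC L (insert e.1 U) := hc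
        _ = pvMC (e :: L) U := by simp [pvMC, min_eq_left h]
    · obtain ⟨S, hS, hc⟩ := ih (insert e.2 U)
      refine ⟨insert e.2 S, ?_, ?_⟩
      · intro f hf
        rcases List.mem_cons.1 hf with rfl | hf
        · exact Or.inr (Finset.mem_insert_self _ _)
        · rcases hS f hf with h' | h'
          · exact Or.inl (Finset.mem_insert_of_mem h')
          · exact Or.inr (Finset.mem_insert_of_mem h')
      · have heq : U ∪ insert e.2 S = insert e.2 U ∪ S := by ext x; simp
        rw [heq]
        calc (insert e.2 U ∪ S).card ≤ pvMC L (insert e.2 U) := hc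
        _ = pvMC (e :: L) U := by simp [pvMC, min_eq_right h]

theorem pvMC_eq_vc (L : List (Char × Char)) : pvMC L ∅ = pvVC L := by
  apply le_antisymm
  · obtain ⟨S, hS, hcard⟩ := Nat.sInf_mem (pvVCSet_nonempty L)
    calc pvMC L ∅ ≤ (∅ ∪ S).card := pvMC_le L ∅ S hS
    _ = S.card := by simp
    _ = pvVC L := hcard
  · obtain ⟨S, hS, hc⟩ := pvMC_achieved L ∅
    exact le_trans (Nat.sInf_le ⟨S, hS, rfl⟩) (by simpa using hc)

-- ---- B's branching computes the minimum vertex cover ----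

theorem pvVC_nil : pvVC [] = 0 := by
  apply Nat.sInf_eq_zero.2
  exact Or.inl ⟨∅, fun f hf => absurd hf (by simp), Finset.card_empty⟩

theorem pvMem_dropTouch (v : Char) (es : List (Char × Char)) (f : Char × Char) :
    f ∈ pvDropTouch v es ↔ f ∈ es ∧ f.1 ≠ v ∧ f.2 ≠ v := by
  simp [pvDropTouch]

theorem pvVC_le_one_add (E : List (Char × Char)) (v : Char) :
    pvVC E ≤ 1 + pvVC (pvDropTouch v E) := by
  obtain ⟨S, hS, hc⟩ := Nat.sInf_mem (pvVCSet_nonempty (pvDropTouch v E))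
  have hhit : pvHits (insert v S) E := by
    intro f hf
    by_cases h1 : f.1 = v
    · exact Or.inl (by simp [h1])
    by_cases h2 : f.2 = v
    · exact Or.inr (by simp [h2])
    rcases hS f ((pvMem_dropTouch v E f).2 ⟨hf, h1, h2⟩) with h | h
    · exact Or.inl (Finset.mem_insert_of_mem h)
    · exact Or.inr (Finset.mem_insert_of_mem h)
  have h1 : pvVC E ≤ (insert v S).card := Nat.sInf_le ⟨insert v S, hhit, rfl⟩
  have h2 : (insert v S).card ≤ S.card + 1 := Finset.card_insert_le _ _
  have hc2 : S.card = pvVC (pvDropTouch v E) := hc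
  omega

theorem pvVC_branch (E : List (Char × Char)) (e : Char × Char) (he : e ∈ E) :
    pvVC E = 1 + min (pvVC (pvDropTouch e.1 E)) (pvVC (pvDropTouch e.2 E)) := by
  apply le_antisymm
  · rcases le_total (pvVC (pvDropTouch e.1 E)) (pvVC (pvDropTouch e.2 E)) with h | h
    · rw [min_eq_left h]; exact pvVC_le_one_add E e.1
    · rw [min_eq_right h]; exact pvVC_le_one_add E e.2
  · obtain ⟨S, hS, hc⟩ := Nat.sInf_mem (pvVCSet_nonempty E)
    have key : ∀ v : Char, v ∈ S → pvVC (pvDropTouch v E) ≤ S.card - 1 := by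
      intro v hv
      have hhit : pvHits (S.erase v) (pvDropTouch v E) := by
        intro f hf
        obtain ⟨hfe, h1, h2⟩ := (pvMem_dropTouch v E f).1 hf
        rcases hS f hfe with h | h
        · exact Or.inl (Finset.mem_erase.2 ⟨h1, h⟩)
        · exact Or.inr (Finset.mem_erase.2 ⟨h2, h⟩)
      calc pvVC (pvDropTouch v E) ≤ (S.erase v).card := Nat.sInf_le ⟨_, hhit, rfl⟩
      _ = S.card - 1 := Finset.card_erase_of_mem hv
    have hc2 : S.card = pvVC E := hc
    rcases hS e he with hv | hv
    · have h1 := key e.1 hv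
      have h3 : 1 ≤ S.card := Finset.card_pos.2 ⟨e.1, hv⟩
      have h4 : min (pvVC (pvDropTouch e.1 E)) (pvVC (pvDropTouch e.2 E))
          ≤ pvVC (pvDropTouch e.1 E) := min_le_left _ _
      omega
    · have h1 := key e.2 hv
      have h3 : 1 ≤ S.card := Finset.card_pos.2 ⟨e.2, hv⟩
      have h4 : min (pvVC (pvDropTouch e.1 E)) (pvVC (pvDropTouch e.2 E))
          ≤ pvVC (pvDropTouch e.2 E) := min_le_right _ _
      omega

theorem pvCover_eq (es : List (Char × Char)) : pvCover es = (pvVC es : Int) := by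
  match es with
  | [] => simp [pvCover, pvVC_nil]
  | e :: t =>
    rw [pvCover]
    have hm : pvMinEdge e t ∈ e :: t := pvMinEdge_mem e t
    have hb := pvVC_branch (e :: t) (pvMinEdge e t) hm
    by_cases hmm : (pvMinEdge e t).1 = (pvMinEdge e t).2
    · rw [if_pos hmm]
      rw [pvCover_eq (pvDropTouch (pvMinEdge e t).1 (e :: t))]
      rw [hb, ← hmm, min_self]
      push_cast
      ring
    · rw [if_neg hmm]
      rw [pvCover_eq (pvDropTouch (pvMinEdge e t).1 (e :: t)),
          pvCover_eq (pvDropTouch (pvMinEdge e t).2 (e :: t))]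
      rw [hb]
      push_cast
      ring
termination_by es.length
decreasing_by
  · exact pvDropTouch_lt _ _ _ hm (Or.inl rfl)
  · exact pvDropTouch_lt _ _ _ hm (Or.inl rfl)
  · exact pvDropTouch_lt _ _ _ hm (Or.inr rfl)

-- ---- B's edge set covers exactly like the pair list ----

theorem pvMem_foldl_add {α : Type} [BEq α] [LawfulBEq α] (l : List Nat) (f : Nat → α)
    (s0 : PySem.Set α) (x : α) :
    x ∈ l.foldl (fun s i => PySem.Set.add s (f i)) s0 ↔ x ∈ s0 ∨ ∃ i ∈ l, x = f i := by
  induction l generalizing s0 with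
  | nil => simp
  | cons a t ih =>
    simp only [List.foldl_cons, ih, PySem.Set.mem_add, List.mem_cons]
    constructor
    · rintro (⟨h | h⟩ | ⟨i, hi, hx⟩)
      · exact Or.inl h
      · exact Or.inr ⟨a, Or.inl rfl, h⟩
      · exact Or.inr ⟨i, Or.inr hi, hx⟩
    · rintro (h | ⟨i, rfl | hi, hx⟩)
      · exact Or.inl (Or.inl h)
      · exact Or.inl (Or.inr hx)
      · exact Or.inr ⟨i, hi, hx⟩

theorem pvMem_edges (p q : List Char) (x : Char × Char) :
    x ∈ pvEdges p q ↔ ∃ i ∈ List.range p.length, x = pvNorm (p.getD i ' ') (q.getD i ' ') := by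
  unfold pvEdges
  rw [pvMem_foldl_add]
  simp [PySem.Set.empty]

theorem pvHits_norm (S : Finset Char) (a b : Char) :
    ((pvNorm a b).1 ∈ S ∨ (pvNorm a b).2 ∈ S) ↔ (a ∈ S ∨ b ∈ S) := by
  unfold pvNorm
  split
  · simp
  · simp [or_comm]

theorem pvHits_edges_iff (p q : List Char) (S : Finset Char) :
    pvHits S (pvEdges p q) ↔ pvHits S (pvPairs p q) := by
  constructor
  · intro h f hf
    simp only [pvPairs, List.mem_map, List.mem_range] at hf
    obtain ⟨i, hi, rfl⟩ := hf
    have := h _ ((pvMem_edges p q _).2 ⟨i, List.mem_range.2 hi, rfl⟩)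
    exact (pvHits_norm S _ _).1 this
  · intro h f hf
    obtain ⟨i, hi, rfl⟩ := (pvMem_edges p q f).1 hf
    apply (pvHits_norm S _ _).2
    exact h _ (by simp [pvPairs]; exact ⟨i, List.mem_range.1 hi, rfl⟩)

theorem pvVC_edges (p q : List Char) : pvVC (pvEdges p q) = pvVC (pvPairs p q) := by
  have h : pvVCSet (pvEdges p q) = pvVCSet (pvPairs p q) := by
    ext k
    constructor <;> rintro ⟨S, hS, hc⟩
    · exact ⟨S, (pvHits_edges_iff p q S).1 hS, hc⟩
    · exact ⟨S, (pvHits_edges_iff p q S).2 hS, hc⟩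
  unfold pvVC
  rw [h]

-- ===== VERDICT (by name: the statement is the Claim_ definition above) =====
theorem min_distict_letters_combine_2_strings_bf_spec : Claim_equal_min_distict_letters_combine_2_strings_bf := by
  intro P Q _ _
  unfold Spec_min_distict_letters_combine_2_strings_bf
  unfold min_distict_letters_combine_2_strings_bf min_distict_letters_combine_2_strings_bf_alt
  rw [pvDpA_eq P.toList Q.toList 0 [] (Nat.zero_le _) (fun _ => List.nodup_nil)]
  rw [pvCover_eq]
  rw [pvVC_edges]
  simp [pvMC_eq_vc]
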